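-- pv_equiv track=rewrite | github.com/procGro/phrutis_bip39scan | bip39scan-procgro/generators.py | sequential_search
-- ===== SOURCE A (Python) =====
-- from typing import Iterator, List, Optional
-- import itertools
--
-- def sequential_search(template: List[str], wordlist: List[str]) -> Iterator[str]:
--     """
--     Generates all possible mnemonic phrases from a template with placeholders.
--     Used for Mode 1.
--
--     Args:
--         template (List[str]): A list of words and '*' placeholders.
--         wordlist (List[str]): The list of words to use for placeholders.
--     """
--     placeholder_indices = [i for i, word in enumerate(template) if word == '*']
--     num_placeholders = len(placeholder_indices)
--
--     if not num_placeholders: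
--         yield " ".join(template)
--         return
--
--     # Create an iterator that yields tuples of replacement words
--     word_combinations = itertools.product(wordlist, repeat=num_placeholders)
--
--     # Create a mutable copy of the template
--     current_phrase = list(template)
--
--     for combination in word_combinations:
--         # Fill in the placeholders with the current combination
--         for i, word in enumerate(combination):
--             current_phrase[placeholder_indices[i]] = word
--         yield " ".join(current_phrase)
-- ===== SOURCE B (Python) =====
-- from typing import Iterator, List
--
-- def sequential_search(template: List[str], wordlist: List[str]) -> Iterator[str]:
--     """Splits the template once into literal word segments separated by '*',
--     then recursively enumerates one wordlist choice per gap (recursion depth =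
--     number of placeholders), yielding phrases in the same odometer order."""
--     segments: List[List[str]] = [[]]
--     for word in template:
--         if word == '*':
--             segments.append([])
--         else:
--             segments[-1].append(word)
--
--     def rec(acc: List[str], remaining: List[List[str]]) -> Iterator[str]:
--         if not remaining:
--             yield " ".join(acc)
--             return
--         for w in wordlist:
--             yield from rec(acc + [w] + remaining[0], remaining[1:])
--
--     yield from rec(list(segments[0]), segments[1:])
-- ===== Notes on version B (the rewrite author's own statement) =====
-- stated objective: alternative
-- what changed: Replaces the flat itertools.product-over-placeholder-indices loop (precompute indices, fill a mutable template copy per tuple) with a one-pass split of the template into literal segments followed by a recursion that picks one wordlist word per gap, yielding the same odometer order.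
import Mathlib
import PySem

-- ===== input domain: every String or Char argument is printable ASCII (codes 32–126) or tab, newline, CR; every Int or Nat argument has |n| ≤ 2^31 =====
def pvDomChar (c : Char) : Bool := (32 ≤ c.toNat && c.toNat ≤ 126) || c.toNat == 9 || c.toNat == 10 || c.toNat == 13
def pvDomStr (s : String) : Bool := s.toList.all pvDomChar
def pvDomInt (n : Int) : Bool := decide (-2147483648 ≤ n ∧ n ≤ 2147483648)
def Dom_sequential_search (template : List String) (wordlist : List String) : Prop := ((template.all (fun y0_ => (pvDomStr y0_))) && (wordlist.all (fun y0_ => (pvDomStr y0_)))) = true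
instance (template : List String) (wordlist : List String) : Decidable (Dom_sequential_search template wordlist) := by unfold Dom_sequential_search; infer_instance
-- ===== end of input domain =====

-- B splits the template once into literal word segments and recursively enumerates one
-- wordlist choice per gap, instead of A's flat itertools.product over precomputed
-- placeholder indices; objective: alternative decomposition, same cost.


-- ===== PORT A =====
-- itertools.product(wordlist, repeat=n): tuples in odometer order (first coordinate slowest)
def pvProduct (wordlist : List String) : Nat → List (List String)
  | 0 => [[]]
  | n + 1 => wordlist.flatMap (fun w => (pvProduct wordlist n).map (fun c => w :: c))

def sequential_search (template : List String) (wordlist : List String) : List String :=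
  -- placeholder_indices = [i for i, word in enumerate(template) if word == '*']
  let placeholder_indices :=
    (PySem.List.enumerate template).filterMap (fun p => if p.2 = "*" then some p.1 else none)
  let num_placeholders := placeholder_indices.length
  if num_placeholders = 0 then
    [String.intercalate " " template]
  else
    -- for combination in product: fill each placeholder, yield " ".join(current_phrase)
    -- (the enumerate indices are nonnegative, so .toNat is exact here)
    (pvProduct wordlist num_placeholders).map (fun combination =>
      String.intercalate " "
        ((combination.zip placeholder_indices).foldl
          (fun (ph : List String) (p : String × Int) => ph.set p.2.toNat p.1) template))

-- ===== PORT B =====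
-- rec(acc, remaining): one wordlist choice per remaining segment gap
def pvRecB (wordlist : List String) : List String → List (List String) → List String
  | acc, [] => [String.intercalate " " acc]
  | acc, seg :: rest => wordlist.flatMap (fun w => pvRecB wordlist (acc ++ [w] ++ seg) rest)

-- the segment-building loop body: '*' starts a new segment, otherwise append to the last
def pvSegStep (segs : List (List String)) (word : String) : List (List String) :=
  if word = "*" then segs ++ [[]] else segs.dropLast ++ [(segs.getLastD []) ++ [word]]

def sequential_search_alt (template : List String) (wordlist : List String) : List String :=
  let segments := template.foldl pvSegStep [[]]
  -- segments is always nonempty; segments[0] / segments[1:] ported via headD/tail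
  pvRecB wordlist (segments.headD []) segments.tail

-- ===== PRECONDITION & SPEC =====
def Spec_sequential_search (template : List String) (wordlist : List String) (out : List String) : Prop := out = sequential_search_alt template wordlist
instance (template : List String) (wordlist : List String) (out : List String) : Decidable (Spec_sequential_search template wordlist out) := by unfold Spec_sequential_search; infer_instance

-- ===== CLAIM (what is proved, stated in full; the proofs are below) =====
def Claim_equal_sequential_search : Prop := ∀ (template : List String) (wordlist : List String), Dom_sequential_search template wordlist → Spec_sequential_search template wordlist (sequential_search template wordlist)

-- ===== LEMMAS AND PROOFS =====

-- placeholder indices of a template, as naturals, recursively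
def phIdx : List String → List Nat
  | [] => []
  | w :: rest => if w = "*" then 0 :: (phIdx rest).map (· + 1) else (phIdx rest).map (· + 1)

-- all expansions of a template suffix, as word lists (semantic middle ground)
def exps (wl : List String) : List String → List (List String)
  | [] => [[]]
  | w :: rest =>
    if w = "*" then wl.flatMap (fun x => (exps wl rest).map (x :: ·))
    else (exps wl rest).map (w :: ·)

lemma enum_filter_star (t : List String) (s : Int) :
    (PySem.List.enumerate t s).filterMap (fun p => if p.2 = "*" then some p.1 else none)
      = (phIdx t).map (fun (n : Nat) => s + (n : Int)) := by
  induction t generalizing s with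
  | nil => simp [phIdx]
  | cons w rest ih =>
    simp only [PySem.List.enumerate_cons, List.filterMap_cons, phIdx]
    by_cases hw : w = "*" <;>
      simp [hw, ih (s + 1), List.map_map] <;>
      · intro n _; ring

lemma fill_shift (w : String) (t : List String) (c : List String) (idxs : List Nat) :
    (c.zip (idxs.map (· + 1))).foldl (fun ph p => ph.set p.2 p.1) (w :: t)
      = w :: (c.zip idxs).foldl (fun ph p => ph.set p.2 p.1) t := by
  induction c generalizing idxs t with
  | nil => simp
  | cons x c ih =>
    cases idxs with
    | nil => simp
    | cons i idxs => simp [List.set, ih]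

lemma foldl_toNat (c : List String) (idxs : List Nat) (t : List String) :
    (c.zip (idxs.map (fun (n : Nat) => (n : Int)))).foldl
        (fun (ph : List String) (p : String × Int) => ph.set p.2.toNat p.1) t
      = (c.zip idxs).foldl (fun ph p => ph.set p.2 p.1) t := by
  induction c generalizing idxs t with
  | nil => simp
  | cons x c ih =>
    cases idxs with
    | nil => simp
    | cons i idxs => simp [ih]

lemma product_fill (wl : List String) (t : List String) :
    (pvProduct wl (phIdx t).length).map
      (fun c => (c.zip (phIdx t)).foldl (fun ph p => ph.set p.2 p.1) t)
      = exps wl t := by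
  induction t with
  | nil => simp [phIdx, pvProduct, exps]
  | cons w rest ih =>
    by_cases hw : w = "*"
    · simp only [phIdx, hw, if_true, exps, List.length_cons, pvProduct, List.length_map,
        List.map_flatMap]
      apply List.flatMap_congr
      intro x _
      rw [← ih, List.map_map, List.map_map]
      apply List.map_congr_left
      intro c _
      simp [List.set, fill_shift]
    · simp only [phIdx, exps, if_neg hw, List.length_map, ← ih]
      rw [List.map_map]
      apply List.map_congr_left
      intro c _
      simp [fill_shift]

-- (head segment, remaining segments) of a template, recursively
def segsOf : List String → (List String × List (List String))
  | [] => ([], [])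
  | w :: t =>
    let p := segsOf t
    if w = "*" then ([], p.1 :: p.2) else (w :: p.1, p.2)

-- all ways to fill the gaps before the given segments
def prodSegs (wl : List String) : List (List String) → List (List String)
  | [] => [[]]
  | seg :: rest => wl.flatMap (fun w => (prodSegs wl rest).map (fun z => [w] ++ seg ++ z))

lemma foldl_segStep (t : List String) (pre : List (List String)) (last : List String) :
    t.foldl pvSegStep (pre ++ [last])
      = pre ++ ((last ++ (segsOf t).1) :: (segsOf t).2) := by
  induction t generalizing pre last with
  | nil => simp [segsOf]
  | cons w t ih =>
    simp only [List.foldl_cons, pvSegStep, segsOf]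
    by_cases hw : w = "*"
    · rw [if_pos hw, if_pos hw]
      rw [ih (pre ++ [last]) []]
      simp
    · rw [if_neg hw, if_neg hw, List.dropLast_concat, List.getLastD_concat]
      rw [ih pre (last ++ [w])]
      simp

lemma exps_segsOf (wl : List String) (t : List String) :
    exps wl t = (prodSegs wl (segsOf t).2).map (fun z => (segsOf t).1 ++ z) := by
  induction t with
  | nil => simp [exps, segsOf, prodSegs]
  | cons w t ih =>
    by_cases hw : w = "*"
    · simp only [exps, if_pos hw, segsOf, prodSegs, ih, List.map_flatMap]
      apply List.flatMap_congr
      intro x _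
      simp [List.map_map, Function.comp]
    · simp only [exps, if_neg hw, segsOf, ih]
      simp [List.map_map, Function.comp]

lemma pvRecB_prodSegs (wl : List String) (ss : List (List String)) (acc : List String) :
    pvRecB wl acc ss
      = (prodSegs wl ss).map (fun z => String.intercalate " " (acc ++ z)) := by
  induction ss generalizing acc with
  | nil => simp [pvRecB, prodSegs]
  | cons seg rest ih =>
    simp only [pvRecB, prodSegs, List.map_flatMap]
    apply List.flatMap_congr
    intro w _
    rw [ih]
    simp [List.map_map, Function.comp]

lemma alt_exps (t wl : List String) :
    sequential_search_alt t wl = (exps wl t).map (String.intercalate " ") := by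
  unfold sequential_search_alt
  have h := foldl_segStep t [] []
  simp only [List.nil_append] at h
  rw [h]
  simp only [List.headD_cons, List.tail_cons]
  rw [pvRecB_prodSegs, exps_segsOf, List.map_map]
  rfl

lemma seq_exps (t wl : List String) :
    sequential_search t wl = (exps wl t).map (String.intercalate " ") := by
  unfold sequential_search
  have he := enum_filter_star t 0
  have hz : (phIdx t).map (fun (n : Nat) => (0 : Int) + (n : Int)) = (phIdx t).map (fun (n : Nat) => (n : Int)) := by
    simp
  rw [he, hz]
  simp only [List.length_map]
  by_cases h : (phIdx t).length = 0
  · rw [if_pos h]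
    have hnil : phIdx t = [] := List.length_eq_zero_iff.mp h
    have := product_fill wl t
    rw [hnil] at this
    simp only [pvProduct, List.zip_nil_right, List.foldl_nil] at this
    rw [← this]
    rfl
  · rw [if_neg h]
    have : ∀ c ∈ pvProduct wl (phIdx t).length,
        String.intercalate " "
            ((c.zip ((phIdx t).map (fun (n : Nat) => (n : Int)))).foldl
              (fun (ph : List String) (p : String × Int) => ph.set p.2.toNat p.1) t)
          = String.intercalate " " ((c.zip (phIdx t)).foldl (fun ph p => ph.set p.2 p.1) t) := by
      intro c _
      rw [foldl_toNat]
    rw [List.map_congr_left this, ← product_fill wl t, List.map_map]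
    rfl

-- ===== VERDICT (by name: the statement is the Claim_ definition above) =====
theorem sequential_search_spec : Claim_equal_sequential_search := by
  intro template wordlist _
  unfold Spec_sequential_search
  rw [alt_exps, seq_exps]
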